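-- pv_equiv track=rewrite | github.com/APNovichkov/python-datastructures | base-conversions/base_conversion.py | decode_digits
-- ===== SOURCE A (Python) =====
-- import string
--
-- def decode_digits(digits, base):
--     output = 0
--     index = 0
--     for digit in digits:
--         if digit not in string.digits:
--             digit = convert_char_to_num(digit)
--
--         output += int(digit) * (base**(len(digits) - 1 - index))
--         index += 1
--
--     return output
--
-- def convert_char_to_num(input_char):
--     ascii_keyval = 65
--     return int(ord(input_char.upper()) - ascii_keyval) + 10
-- ===== SOURCE B (Python) =====
-- import string
--
-- def decode_digits(digits, base):
--     # Horner's method: one multiply-add per character, no exponentiation.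
--     output = 0
--     for digit in digits:
--         if digit in string.digits:
--             val = ord(digit) - 48
--         else:
--             val = ord(digit.upper()) - 65 + 10
--         output = output * base + val
--     return output
-- ===== Notes on version B (the rewrite author's own statement) =====
-- stated objective: faster
-- what changed: Replaces the per-position computation of int(digit)*base**(len-1-i) with Horner's method (output = output*base + digit_value), removing all exponentiations.
import Mathlib
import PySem

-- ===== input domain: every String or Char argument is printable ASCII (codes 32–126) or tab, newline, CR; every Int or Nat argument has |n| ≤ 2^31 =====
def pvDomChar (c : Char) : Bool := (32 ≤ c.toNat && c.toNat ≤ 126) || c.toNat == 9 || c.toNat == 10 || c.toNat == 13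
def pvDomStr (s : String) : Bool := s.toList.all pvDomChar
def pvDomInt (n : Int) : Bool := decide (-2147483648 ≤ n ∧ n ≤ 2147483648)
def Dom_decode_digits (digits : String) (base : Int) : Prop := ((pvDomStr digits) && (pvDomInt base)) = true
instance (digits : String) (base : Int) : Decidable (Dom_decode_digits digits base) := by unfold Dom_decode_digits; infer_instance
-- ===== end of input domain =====

-- B is Horner's method (output = output*base + digit_value), removing A's per-position exponentiation; return value only, no side effects.

-- ===== PORT A =====
-- helper convert_char_to_num: int(ord(input_char.upper()) - 65) + 10  (upperChar = single-char str.upper, exact on ASCII)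
def convert_char_to_num (input_char : Char) : Int :=
  ((PySem.Chars.upperChar input_char).toNat : Int) - 65 + 10

-- for-loop over the characters with state (output, index); int(digit) on a char of
-- string.digits is its code minus 48 (exact there); base**(len-1-index) with the Nat
-- exponent len-1-index, which is the Python exponent at every iteration (index < len).
def decode_digits (digits : String) (base : Int) : Int :=
  let n := digits.toList.length
  (digits.toList.foldl
    (fun (st : Int × Nat) digit =>
      let d : Int := if digit ∈ "0123456789".toList then (digit.toNat : Int) - 48
                     else convert_char_to_num digit
      (st.1 + d * base ^ (n - 1 - st.2), st.2 + 1))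
    (0, 0)).1

-- ===== PORT B =====
-- per-character value: ord(digit)-48 for an ASCII digit, else ord(digit.upper())-65+10
def pvValB (digit : Char) : Int :=
  if digit ∈ "0123456789".toList then (digit.toNat : Int) - 48
  else ((PySem.Chars.upperChar digit).toNat : Int) - 65 + 10

def decode_digits_alt (digits : String) (base : Int) : Int :=
  digits.toList.foldl (fun output digit => output * base + pvValB digit) 0

-- ===== PRECONDITION & SPEC =====
def Spec_decode_digits (digits : String) (base : Int) (out : Int) : Prop := out = decode_digits_alt digits base
instance (digits : String) (base : Int) (out : Int) : Decidable (Spec_decode_digits digits base out) := by unfold Spec_decode_digits; infer_instance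

-- ===== CLAIM (what is proved, stated in full; the proofs are below) =====
def Claim_equal_decode_digits : Prop := ∀ (digits : String) (base : Int), Dom_decode_digits digits base → Spec_decode_digits digits base (decode_digits digits base)

-- ===== LEMMAS AND PROOFS =====

-- the common positional value Σ d_i · base^(n-1-i), written structurally
def pvPoly (base : Int) : List Char → Int
  | [] => 0
  | c :: t => pvValB c * base ^ t.length + pvPoly base t

-- the digit value computed inline by A's loop body is pvValB
theorem pvValA_eq (c : Char) :
    (if c ∈ "0123456789".toList then (c.toNat : Int) - 48 else convert_char_to_num c)
      = pvValB c := by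
  simp [pvValB, convert_char_to_num]

theorem pvB_fold (base : Int) : ∀ (l : List Char) (a : Int),
    l.foldl (fun output digit => output * base + pvValB digit) a
      = a * base ^ l.length + pvPoly base l := by
  intro l
  induction l with
  | nil => intro a; simp [pvPoly]
  | cons c t ih =>
    intro a
    simp only [List.foldl_cons, ih, pvPoly, List.length_cons]
    ring

theorem pvA_fold (base : Int) (n : Nat) : ∀ (l : List Char) (out : Int) (idx : Nat),
    idx + l.length = n →
    (l.foldl
      (fun (st : Int × Nat) digit =>
        let d : Int := if digit ∈ "0123456789".toList then (digit.toNat : Int) - 48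
                       else convert_char_to_num digit
        (st.1 + d * base ^ (n - 1 - st.2), st.2 + 1))
      (out, idx)).1 = out + pvPoly base l := by
  intro l
  induction l with
  | nil => intro out idx _; simp [pvPoly]
  | cons c t ih =>
    intro out idx h
    have hexp : n - 1 - idx = t.length := by simp at h; omega
    simp only [List.foldl_cons, pvPoly]
    rw [ih _ (idx + 1) (by simp at h ⊢; omega), pvValA_eq, hexp]
    ring

-- ===== VERDICT (by name: the statement is the Claim_ definition above) =====
theorem decode_digits_spec : Claim_equal_decode_digits := by
  intro digits base _
  show decode_digits digits base = decode_digits_alt digits base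
  unfold decode_digits decode_digits_alt
  rw [pvB_fold, pvA_fold base digits.toList.length digits.toList 0 0 (by simp)]
  ring
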